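-- pv_equiv track=rewrite | github.com/afknst/gxb2_tables | misc/bizarre_adventures/bizarre.py | s2ve
-- ===== SOURCE A (Python) =====
-- REWARDS = [(3, 6, 48, 60), (4, 6, 60, 60), (0, 2, 0, 25)]
--
-- def s2ve(_stage, _map):
--     _s = 0
--     for _i in range(_stage - 1):
--         _r = get_rewards(_i + 1)
--         _s += 5 * _r[1] + _r[3]
--     _r = get_rewards(_stage)
--     _s += _map[0] * _r[1] + _map[1] * _r[3]
--     return _s
--
-- def get_rewards(_stage):
--     if _stage <= 25:
--         return REWARDS[0]
--     if _stage <= 50: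
--         return REWARDS[1]
--     return REWARDS[2]
-- ===== SOURCE B (Python) =====
-- def s2ve(_stage, _map):
--     # Closed form: every completed stage s in 1..(_stage-1) contributes
--     # 90 if s <= 50 (both early reward tiers give r[1]=6, r[3]=60) and 35 otherwise.
--     n = _stage - 1
--     full = 90 * max(0, min(n, 50)) + 35 * max(0, n - 50)
--     r1, r3 = (6, 60) if _stage <= 50 else (2, 25)
--     return full + _map[0] * r1 + _map[1] * r3
-- ===== Notes on version B (the rewrite author's own statement) =====
-- stated objective: faster
-- what changed: Replaces the O(stage) loop over completed stages by a closed form: the per-stage reward is 90 for stages <= 50 and 35 above, so B multiplies bucket sizes (min/max arithmetic) and adds the partial-stage term from a single two-way branch.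
import Mathlib
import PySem

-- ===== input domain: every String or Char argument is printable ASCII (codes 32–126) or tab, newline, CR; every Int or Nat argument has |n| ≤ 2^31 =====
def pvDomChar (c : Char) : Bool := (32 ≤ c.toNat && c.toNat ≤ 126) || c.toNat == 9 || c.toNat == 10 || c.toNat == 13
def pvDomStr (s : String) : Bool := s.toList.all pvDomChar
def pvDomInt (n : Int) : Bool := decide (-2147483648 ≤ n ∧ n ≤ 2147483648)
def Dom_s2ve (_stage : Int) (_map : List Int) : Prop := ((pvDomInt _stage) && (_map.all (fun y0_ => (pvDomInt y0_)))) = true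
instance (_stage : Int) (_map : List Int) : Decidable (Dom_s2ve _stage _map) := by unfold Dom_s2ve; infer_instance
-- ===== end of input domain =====

-- B replaces A's O(stage) loop by an O(1) closed form (bucket counts × constant per-stage rewards).

-- ===== PORT A =====
def pvRewards : List (Int × Int × Int × Int) := [(3, 6, 48, 60), (4, 6, 60, 60), (0, 2, 0, 25)]

def getRewards (_stage : Int) : Int × Int × Int × Int :=
  if _stage ≤ 25 then pvRewards.getD 0 (0,0,0,0)
  else if _stage ≤ 50 then pvRewards.getD 1 (0,0,0,0)
  else pvRewards.getD 2 (0,0,0,0)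

def s2ve (_stage : Int) (_map : List Int) : Int :=
  let _s : Int :=
    (PySem.List.pyRange 0 (_stage - 1) 1).foldl
      (fun acc _i =>
        let _r := getRewards (_i + 1)
        acc + (5 * _r.2.1 + _r.2.2.2)) 0
  let _r := getRewards _stage
  _s + (PySem.List.pyGetD _map 0 0 * _r.2.1 + PySem.List.pyGetD _map 1 0 * _r.2.2.2)

-- ===== PORT B =====
def s2ve_alt (_stage : Int) (_map : List Int) : Int :=
  let n := _stage - 1
  let full := 90 * max 0 (min n 50) + 35 * max 0 (n - 50)
  let r : Int × Int := if _stage ≤ 50 then (6, 60) else (2, 25)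
  full + PySem.List.pyGetD _map 0 0 * r.1 + PySem.List.pyGetD _map 1 0 * r.2

-- ===== PRECONDITION & SPEC =====
-- Pre_ excludes only maps with fewer than 2 entries, where Python A raises IndexError (B raises there too).
def Pre_s2ve (_stage : Int) (_map : List Int) : Prop := 2 ≤ _map.length
instance (_stage : Int) (_map : List Int) : Decidable (Pre_s2ve _stage _map) := by unfold Pre_s2ve; infer_instance
def pvWitness_s2ve : Int × List Int := (27, [2, 1])

def Spec_s2ve (_stage : Int) (_map : List Int) (out : Int) : Prop := out = s2ve_alt _stage _map
instance (_stage : Int) (_map : List Int) (out : Int) : Decidable (Spec_s2ve _stage _map out) := by unfold Spec_s2ve; infer_instance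

-- ===== CLAIM (what is proved, stated in full; the proofs are below) =====
def Claim_equal_s2ve : Prop := ∀ (_stage : Int) (_map : List Int), Dom_s2ve _stage _map → Pre_s2ve _stage _map → Spec_s2ve _stage _map (s2ve _stage _map)

-- ===== LEMMAS AND PROOFS =====

-- the per-stage contribution of a completed stage _i+1 in A's loop
theorem pvStep (i : Int) :
    5 * (getRewards (i + 1)).2.1 + (getRewards (i + 1)).2.2.2
      = if i + 1 ≤ 50 then (90 : Int) else 35 := by
  unfold getRewards pvRewards
  by_cases h1 : i + 1 ≤ 25 <;> by_cases h2 : i + 1 ≤ 50 <;> simp [h1, h2]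
  omega

-- closed form of A's loop sum over stages 1..n
theorem pvLoopSum (n : Nat) :
    ((PySem.List.pyRange 0 (n : Int) 1).map
        (fun i => 5 * (getRewards (i + 1)).2.1 + (getRewards (i + 1)).2.2.2)).sum
      = 90 * min (n : Int) 50 + 35 * max 0 ((n : Int) - 50) := by
  induction n with
  | zero => simp [PySem.List.pyRange_one_eq_nil]
  | succ m ih =>
      have hcast : ((m + 1 : Nat) : Int) = (m : Int) + 1 := by push_cast; ring
      rw [hcast, PySem.List.pyRange_one_succ_right (Int.natCast_nonneg m)]
      rw [List.map_append, List.sum_append, ih]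
      simp only [List.map_cons, List.map_nil, List.sum_cons, List.sum_nil, pvStep]
      by_cases h : (m : Int) + 1 ≤ 50 <;> simp [h] <;> omega

-- ===== VERDICT (by name: the statement is the Claim_ definition above) =====
theorem s2ve_spec : Claim_equal_s2ve := by
  intro _stage _map _hdom _hpre
  unfold Spec_s2ve s2ve s2ve_alt
  rw [PySem.List.foldl_add]
  by_cases hneg : _stage - 1 ≤ 0
  · rw [PySem.List.pyRange_one_eq_nil hneg]
    unfold getRewards pvRewards
    have h25 : _stage ≤ 25 := by omega
    have h50 : _stage ≤ 50 := by omega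
    simp [h25, h50]
    omega
  · obtain ⟨n, hn⟩ : ∃ n : Nat, _stage - 1 = (n : Int) :=
      ⟨(_stage - 1).toNat, (Int.toNat_of_nonneg (by omega)).symm⟩
    rw [hn, pvLoopSum]
    unfold getRewards pvRewards
    by_cases h25 : _stage ≤ 25 <;> by_cases h50 : _stage ≤ 50 <;>
      simp [h25, h50] <;> omega
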